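-- pv_equiv track=rewrite | github.com/kyle0527/BioNeuronai | src/nlp/hallucination_detection.py | detect_pattern_repetition
-- ===== SOURCE A (Python) =====
-- from typing import List, Dict, Tuple, Optional
-- from collections import defaultdict
--
-- def detect_pattern_repetition(
--
--     token_ids: List[int],
--     max_pattern_length: int = 10
-- ) -> Tuple[bool, List[Tuple[List[int], int]]]:
--     """
--     檢測重複的模式（如 "A B C A B C A B C"）
--
--     Args:
--         token_ids: token ID 序列
--         max_pattern_length: 最大模式長度
--
--     Returns:
--         has_pattern: 是否存在重複模式
--         patterns: 檢測到的模式列表 [(pattern, count), ...]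
--     """
--     if len(token_ids) < 4:
--         return False, []
--
--     patterns = []
--
--     # 檢測不同長度的模式
--     for pattern_len in range(2, min(max_pattern_length + 1, len(token_ids) // 2 + 1)):
--         pattern_counts: defaultdict[tuple[int, ...], int] = defaultdict(int)
--
--         # 滑動窗口提取模式
--         for i in range(len(token_ids) - pattern_len + 1):
--             pattern = tuple(token_ids[i:i + pattern_len])
--             pattern_counts[pattern] += 1
--
--         # 找出重複次數 >= 3 的模式
--         for pattern, count in pattern_counts.items():
--             if count >= 3:
--                 patterns.append((list(pattern), count))
--
--     has_pattern = len(patterns) > 0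
--     return has_pattern, patterns
-- ===== SOURCE B (Python) =====
-- def detect_pattern_repetition(token_ids, max_pattern_length=10):
--     """Sort-and-group re-implementation: per length, sort the windows, scan runs
--     of equal windows (run length = occurrence count), then order the qualifying
--     patterns by first occurrence. No counting dict."""
--     n = len(token_ids)
--     patterns = []
--     for pattern_len in range(2, min(max_pattern_length + 1, n // 2 + 1)):
--         windows = [token_ids[i:i + pattern_len] for i in range(n - pattern_len + 1)]
--         ordered = sorted(windows)
--         found = []
--         j = 0
--         m = len(ordered)
--         while j < m:
--             k = j
--             while k < m and ordered[k] == ordered[j]: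
--                 k += 1
--             if k - j >= 3:
--                 found.append((ordered[j], k - j))
--             j = k
--         found.sort(key=lambda t: windows.index(t[0]))
--         patterns.extend(found)
--     return len(patterns) > 0, patterns
-- ===== Notes on version B (the rewrite author's own statement) =====
-- stated objective: alternative
-- what changed: B replaces A's hash-counting dict with a sort-and-group algorithm: per length it sorts the window list, scans runs of equal adjacent windows (run length = occurrence count), and reorders the qualifying patterns by first-occurrence index, so no counter dictionary exists at all.
import Mathlib
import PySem

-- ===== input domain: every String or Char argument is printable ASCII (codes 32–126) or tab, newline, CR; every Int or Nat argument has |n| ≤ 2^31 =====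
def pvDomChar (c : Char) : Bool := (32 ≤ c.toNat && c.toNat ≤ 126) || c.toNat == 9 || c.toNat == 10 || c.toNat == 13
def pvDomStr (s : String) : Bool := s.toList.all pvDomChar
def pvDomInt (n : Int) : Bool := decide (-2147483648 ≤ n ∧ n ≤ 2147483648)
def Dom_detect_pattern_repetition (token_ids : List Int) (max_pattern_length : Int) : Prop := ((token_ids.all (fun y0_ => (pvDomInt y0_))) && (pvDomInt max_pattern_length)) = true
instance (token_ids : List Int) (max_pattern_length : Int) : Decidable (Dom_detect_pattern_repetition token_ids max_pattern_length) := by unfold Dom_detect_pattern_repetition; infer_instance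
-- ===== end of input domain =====

-- B replaces A's per-length counting dict by sort-and-group: sort the windows,
-- scan runs of equal adjacent windows (run length = count), then order the
-- qualifying patterns by first occurrence (alternative algorithm, same results).


-- ===== PORT A =====
def detect_pattern_repetition (token_ids : List Int) (max_pattern_length : Int) : Bool × (List (List Int × Int)) :=
  if (token_ids.length : Int) < 4 then (false, [])
  else
    let patterns : List (List Int × Int) :=
      (PySem.List.pyRange 2 (min (max_pattern_length + 1) (PySem.Int.floordiv (token_ids.length : Int) 2 + 1)) 1).foldl
        (fun patterns pattern_len =>
          let pattern_counts : PySem.Dict (List Int) Int :=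
            (PySem.List.pyRange 0 ((token_ids.length : Int) - pattern_len + 1) 1).foldl
              (fun d i => d.modify (PySem.List.slice token_ids (some i) (some (i + pattern_len))) 0 (· + 1))
              PySem.Dict.empty
          pattern_counts.items.foldl
            (fun acc pc => if pc.2 ≥ 3 then acc ++ [(pc.1, pc.2)] else acc) patterns)
        []
    (decide (patterns.length > 0), patterns)

-- ===== PORT B =====
-- B-side helper: the run-scanning while loops of Source B (group equal adjacent
-- windows of the sorted list; a run of length ≥ 3 yields one (pattern, count)).
def pvRuns (l : List (List Int)) : List (List Int × Int) :=
  match l with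
  | [] => []
  | w :: rest =>
      let run := rest.takeWhile (fun q => q == w)
      let rem := rest.dropWhile (fun q => q == w)
      (if ((run.length : Int) + 1) ≥ 3 then [(w, (run.length : Int) + 1)] else []) ++ pvRuns rem
termination_by l.length
decreasing_by
  have h := (List.dropWhile_sublist (l := rest) (p := fun q => q == w)).length_le
  simp only [List.length_cons]
  omega

def detect_pattern_repetition_alt (token_ids : List Int) (max_pattern_length : Int) : Bool × (List (List Int × Int)) :=
  let n : Int := token_ids.length
  let patterns : List (List Int × Int) :=
    (PySem.List.pyRange 2 (min (max_pattern_length + 1) (PySem.Int.floordiv n 2 + 1)) 1).foldl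
      (fun patterns pattern_len =>
        let windows : List (List Int) :=
          (PySem.List.pyRange 0 (n - pattern_len + 1) 1).map
            (fun i => PySem.List.slice token_ids (some i) (some (i + pattern_len)))
        let ordered := PySem.List.sorted windows (fun w => w)
        let found := pvRuns ordered
        patterns ++ PySem.List.sorted found (fun t => (PySem.List.index? windows t.1).getD 0))
      []
  (decide (patterns.length > 0), patterns)

-- ===== PRECONDITION & SPEC =====
def Spec_detect_pattern_repetition (token_ids : List Int) (max_pattern_length : Int) (out : Bool × (List (List Int × Int))) : Prop := out = detect_pattern_repetition_alt token_ids max_pattern_length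
instance (token_ids : List Int) (max_pattern_length : Int) (out : Bool × (List (List Int × Int))) : Decidable (Spec_detect_pattern_repetition token_ids max_pattern_length out) := by unfold Spec_detect_pattern_repetition; infer_instance

-- ===== CLAIM (what is proved, stated in full; the proofs are below) =====
def Claim_equal_detect_pattern_repetition : Prop := ∀ (token_ids : List Int) (max_pattern_length : Int), Dom_detect_pattern_repetition token_ids max_pattern_length → Spec_detect_pattern_repetition token_ids max_pattern_length (detect_pattern_repetition token_ids max_pattern_length)

-- ===== LEMMAS AND PROOFS =====

-- sum of 'if w = v then g w else 0' over a Nodup list picks the one member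
theorem pv_sum_pick (v : List Int) (g : List Int → Nat) :
    ∀ (l : List (List Int)), l.Nodup →
      (l.map (fun w => if w = v then g w else 0)).sum = if v ∈ l then g v else 0 := by
  intro l hnd
  induction l with
  | nil => simp
  | cons x t ih =>
    rcases List.nodup_cons.mp hnd with ⟨hx, ht⟩
    simp only [List.map_cons, List.sum_cons, ih ht]
    by_cases hxv : x = v
    · subst hxv; simp [hx]
    · have hvx : ¬ v = x := fun h => hxv h.symm
      simp [hxv, hvx, List.mem_cons]

-- the span of an all-true block followed by an all-false tail
theorem pv_span_append (p : List Int → Bool) :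
    ∀ (l1 l2 : List (List Int)), (∀ x ∈ l1, p x = true) → (∀ x ∈ l2, p x = false) →
      (l1 ++ l2).takeWhile p = l1 ∧ (l1 ++ l2).dropWhile p = l2 := by
  intro l1
  induction l1 with
  | nil =>
    intro l2 _ h2
    cases l2 with
    | nil => simp
    | cons y t =>
      constructor <;> simp [h2 y (by simp)]
  | cons a t ih =>
    intro l2 h1 h2
    have ha := h1 a (by simp)
    have h := ih l2 (fun x hx => h1 x (by simp [hx])) h2
    simp [ha, h.1, h.2]

-- the two DecidableLT instances on List Int sort identically
theorem pv_sorted_inst (xs : List (List Int)) (rev : Bool) :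
    PySem.List.sorted xs (fun w => w) rev
      = @PySem.List.sorted (List Int) (List Int) List.instLinearOrder.toLT
          LinearOrder.toDecidableLT xs (fun w => w) rev := by
  have h : (fun (a b : List Int) => a.decidableLT b : DecidableLT (List Int))
      = LinearOrder.toDecidableLT := by
    funext a b; exact Subsingleton.elim _ _
  exact congrArg
    (fun i => @PySem.List.sorted (List Int) (List Int) List.instLinearOrder.toLT i xs (fun w => w) rev) h

-- blocks over a strictly increasing distinct-window list are weakly increasing
theorem pv_blocks_pairwise (c : List Int → Nat) :
    ∀ (us : List (List Int)), us.Pairwise (· < ·) →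
      (us.flatMap (fun w => List.replicate (c w) w)).Pairwise (· ≤ ·) := by
  intro us
  induction us with
  | nil => simp
  | cons x t ih =>
    intro hlt
    rcases List.pairwise_cons.mp hlt with ⟨hx, ht⟩
    rw [List.flatMap_cons, List.pairwise_append]
    refine ⟨List.pairwise_replicate.mpr (Or.inr le_rfl), ih ht, ?_⟩
    intro a ha b hb
    have ha' := List.eq_of_mem_replicate ha
    subst ha'
    rcases List.mem_flatMap.mp hb with ⟨w', hw', hb'⟩
    rw [List.eq_of_mem_replicate hb']
    exact le_of_lt (hx w' hw')

-- sorting ws is the block list: sorted distinct windows, each repeated its count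
theorem pv_sorted_blocks (ws : List (List Int)) :
    PySem.List.sorted ws (fun w => w)
      = (PySem.List.sorted (PySem.Set.ofList ws) (fun w => w)).flatMap
          (fun w => List.replicate (List.count w ws) w) := by
  have hperm : (PySem.List.sorted (PySem.Set.ofList ws) (fun w => w)).Perm (PySem.Set.ofList ws) :=
    PySem.List.sorted_perm _ _ _
  have hnd : (PySem.List.sorted (PySem.Set.ofList ws) (fun w => w)).Nodup :=
    hperm.nodup_iff.mpr (PySem.Set.nodup_ofList ws)
  have hmemiff : ∀ y, y ∈ PySem.List.sorted (PySem.Set.ofList ws) (fun w => w) ↔ y ∈ ws :=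
    fun y => hperm.mem_iff.trans (PySem.Set.mem_ofList ws y)
  rw [pv_sorted_inst ws false]
  refine PySem.List.sorted_id_eq_of_perm_of_pairwise ws _ ?_ ?_
  · rw [List.perm_iff_count]
    intro v
    rw [List.count_flatMap]
    have hmap : List.map (List.count v ∘ fun w => List.replicate (List.count w ws) w)
          (PySem.List.sorted (PySem.Set.ofList ws) (fun w => w))
        = List.map (fun w => if w = v then List.count w ws else 0)
          (PySem.List.sorted (PySem.Set.ofList ws) (fun w => w)) := by
      apply List.map_congr_left
      intro w _
      simp [Function.comp, List.count_replicate]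
    rw [hmap, pv_sum_pick v (fun w => List.count w ws) _ hnd]
    by_cases hv : v ∈ ws
    · rw [if_pos ((hmemiff v).mpr hv)]
    · rw [if_neg (fun h => hv ((hmemiff v).mp h))]
      exact (List.count_eq_zero.mpr hv).symm
  · have hlt : (PySem.List.sorted (PySem.Set.ofList ws) (fun w => w)).Pairwise (· < ·) := by
      have h := PySem.List.sorted_ofList_pairwise_lt ws
      rwa [← pv_sorted_inst (PySem.Set.ofList ws) false] at h
    exact pv_blocks_pairwise (fun w => List.count w ws) _ hlt

-- run scan over a block list emits exactly the counts ≥ 3, in block order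
theorem pv_runs_blocks (c : List Int → Nat) :
    ∀ (us : List (List Int)), us.Pairwise (· < ·) → (∀ w ∈ us, 1 ≤ c w) →
      pvRuns (us.flatMap (fun w => List.replicate (c w) w))
        = (us.filter (fun w => decide (((c w : Nat) : Int) ≥ 3))).map
            (fun w => (w, ((c w : Nat) : Int))) := by
  intro us
  induction us with
  | nil => intro _ _; simp [pvRuns]
  | cons w t ih =>
    intro hp h1
    rcases List.pairwise_cons.mp hp with ⟨hw, ht⟩
    have hcw : 1 ≤ c w := h1 w (List.mem_cons_self)
    obtain ⟨n, hn⟩ : ∃ n, c w = n + 1 := ⟨c w - 1, by omega⟩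
    have htrue : ∀ x ∈ List.replicate n w, ((x == w) = true) := by
      intro x hx; simp [List.eq_of_mem_replicate hx]
    have hfalse : ∀ x ∈ t.flatMap (fun w => List.replicate (c w) w), ((x == w) = false) := by
      intro x hx
      rcases List.mem_flatMap.mp hx with ⟨w', hw', hx'⟩
      have hxw : x = w' := List.eq_of_mem_replicate hx'
      subst hxw
      simp only [beq_eq_false_iff_ne, ne_eq]
      exact fun h => absurd (hw x hw') (by rw [h]; exact lt_irrefl w)
    obtain ⟨htw, hdw⟩ :=
      pv_span_append (fun q => q == w) (List.replicate n w)
        (t.flatMap (fun w => List.replicate (c w) w)) htrue hfalse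
    rw [List.flatMap_cons, hn, List.replicate_succ, List.cons_append]
    rw [pvRuns]
    simp only [htw, hdw, List.length_replicate]
    rw [ih ht (fun x hx => h1 x (List.mem_cons_of_mem _ hx))]
    have hval : ((n : Int) + 1) = ((c w : Nat) : Int) := by rw [hn]; push_cast; ring
    rw [hval, List.filter_cons]
    by_cases h3 : ((c w : Nat) : Int) ≥ 3
    · simp [h3]
    · simp [h3]

-- first-occurrence indices strictly increase along the distinct-window list
theorem pv_ofList_idx_pairwise :
    ∀ (ws : List (List Int)),
      (PySem.Set.ofList ws).Pairwise
        (fun a b => (PySem.List.index? ws a).getD 0 < (PySem.List.index? ws b).getD 0) := by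
  intro ws
  induction ws using List.reverseRecOn with
  | nil => simp [PySem.Set.ofList]
  | append_singleton ws x ih =>
    rw [PySem.Set.ofList_append_singleton]
    by_cases hx : x ∈ ws
    · rw [PySem.Set.add_of_mem ((PySem.Set.mem_ofList ws x).mpr hx)]
      refine ih.imp_of_mem ?_
      intro a b ha hb hab
      have ha' : a ∈ ws := (PySem.Set.mem_ofList ws a).mp ha
      have hb' : b ∈ ws := (PySem.Set.mem_ofList ws b).mp hb
      rwa [PySem.List.index?_append_of_mem [x] ha', PySem.List.index?_append_of_mem [x] hb']
    · rw [PySem.Set.add_of_not_mem (fun h => hx ((PySem.Set.mem_ofList ws x).mp h))]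
      rw [List.pairwise_append]
      refine ⟨?_, List.pairwise_singleton _ _, ?_⟩
      · refine ih.imp_of_mem ?_
        intro a b ha hb hab
        have ha' : a ∈ ws := (PySem.Set.mem_ofList ws a).mp ha
        have hb' : b ∈ ws := (PySem.Set.mem_ofList ws b).mp hb
        rwa [PySem.List.index?_append_of_mem [x] ha', PySem.List.index?_append_of_mem [x] hb']
      · intro a ha b hb
        rw [List.mem_singleton] at hb
        rw [hb]
        have ha' : a ∈ ws := (PySem.Set.mem_ofList ws a).mp ha
        rw [PySem.List.index?_append_of_mem [x] ha',
            PySem.List.index?_append_singleton_self ws x hx]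
        rcases hidx : PySem.List.index? ws a with _ | k
        · exact absurd ((PySem.List.index?_eq_none_iff ws a).mp hidx) (by simp [ha'])
        · rcases (PySem.List.index?_eq_some_iff ws a k).mp hidx with ⟨pre, suf, hws, hlen, _⟩
          simp only [Option.getD_some]
          rw [hws]
          simp [← hlen]

-- the per-length body of A equals the per-length body of B
theorem pv_inner_eq (token_ids : List Int) (pattern_len : Int) (patterns : List (List Int × Int)) :
    ((PySem.List.pyRange 0 ((token_ids.length : Int) - pattern_len + 1) 1).foldl
        (fun d i => d.modify (PySem.List.slice token_ids (some i) (some (i + pattern_len))) 0 (· + 1))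
        (PySem.Dict.empty : PySem.Dict (List Int) Int)).items.foldl
      (fun acc pc => if pc.2 ≥ 3 then acc ++ [(pc.1, pc.2)] else acc) patterns
    =
    patterns ++
      PySem.List.sorted
        (pvRuns (PySem.List.sorted
          ((PySem.List.pyRange 0 ((token_ids.length : Int) - pattern_len + 1) 1).map
            (fun i => PySem.List.slice token_ids (some i) (some (i + pattern_len))))
          (fun w => w)))
        (fun t => (PySem.List.index?
          ((PySem.List.pyRange 0 ((token_ids.length : Int) - pattern_len + 1) 1).map
            (fun i => PySem.List.slice token_ids (some i) (some (i + pattern_len)))) t.1).getD 0) := by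
  set ws : List (List Int) :=
    (PySem.List.pyRange 0 ((token_ids.length : Int) - pattern_len + 1) 1).map
      (fun i => PySem.List.slice token_ids (some i) (some (i + pattern_len))) with hws
  -- A side: the counting dict's qualifying items, in first-occurrence order
  have hcounter :
      (PySem.List.pyRange 0 ((token_ids.length : Int) - pattern_len + 1) 1).foldl
        (fun d i => d.modify (PySem.List.slice token_ids (some i) (some (i + pattern_len))) 0 (· + 1))
        PySem.Dict.empty = PySem.Dict.counter ws := by
    rw [PySem.Dict.counter_eq_foldl, hws, List.foldl_map]
  rw [hcounter,
      PySem.List.foldl_append_ite (p := fun pc : List Int × Int => pc.2 ≥ 3)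
        (f := fun pc : List Int × Int => (pc.1, pc.2)),
      PySem.Dict.items_counter, List.filter_map, List.map_map]
  -- B side: blocks, runs, and the final first-occurrence sort
  have hus : (PySem.List.sorted (PySem.Set.ofList ws) (fun w => w)).Pairwise (· < ·) := by
    have h := PySem.List.sorted_ofList_pairwise_lt ws
    rwa [← pv_sorted_inst (PySem.Set.ofList ws) false] at h
  have husmem : ∀ w ∈ PySem.List.sorted (PySem.Set.ofList ws) (fun w => w), 1 ≤ List.count w ws := by
    intro w hwmem
    have : w ∈ ws :=
      (PySem.Set.mem_ofList ws w).mp ((PySem.List.sorted_perm _ _ _).mem_iff.mp hwmem)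
    exact List.count_pos_iff.mpr this
  rw [pv_sorted_blocks ws,
      pv_runs_blocks (fun w => List.count w ws) _ hus husmem]
  -- name the result of the final sort
  have hfinal :
      PySem.List.sorted
        (((PySem.List.sorted (PySem.Set.ofList ws) (fun w => w)).filter
            (fun w => decide ((List.count w ws : Int) ≥ 3))).map
          (fun w => (w, (List.count w ws : Int))))
        (fun t => (PySem.List.index? ws t.1).getD 0)
      = ((PySem.Set.ofList ws).filter (fun w => decide ((List.count w ws : Int) ≥ 3))).map
          (fun w => (w, (List.count w ws : Int))) := by
    refine PySem.List.sorted_eq_of_perm_of_pairwise_lt _ _ _ ?_ ?_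
    · exact (((PySem.List.sorted_perm (PySem.Set.ofList ws) (fun w => w) false).symm.filter
        (fun w => decide ((List.count w ws : Int) ≥ 3))).map _)
    · rw [List.pairwise_map]
      exact (pv_ofList_idx_pairwise ws).filter _
  rw [hfinal]
  rfl

theorem detect_pattern_repetition_eq_alt (token_ids : List Int) (max_pattern_length : Int) :
    detect_pattern_repetition token_ids max_pattern_length
      = detect_pattern_repetition_alt token_ids max_pattern_length := by
  simp only [detect_pattern_repetition, detect_pattern_repetition_alt]
  by_cases h4 : (token_ids.length : Int) < 4
  · have h2 : PySem.Int.floordiv (token_ids.length : Int) 2 = ((token_ids.length / 2 : Nat) : Int) := by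
      exact_mod_cast PySem.Int.floordiv_natCast token_ids.length 2
    have hm : min (max_pattern_length + 1) (PySem.Int.floordiv (token_ids.length : Int) 2 + 1) ≤ 2 := by
      refine le_trans (min_le_right _ _) ?_
      rw [h2]; omega
    rw [if_pos h4, PySem.List.pyRange_one_eq_nil hm]
    simp
  · rw [if_neg h4]
    have hfold := PySem.List.foldl_congr_mem
      (l := PySem.List.pyRange 2
        (min (max_pattern_length + 1) (PySem.Int.floordiv (token_ids.length : Int) 2 + 1)) 1)
      (init := ([] : List (List Int × Int)))
      (f := fun patterns pattern_len =>
        ((PySem.List.pyRange 0 ((token_ids.length : Int) - pattern_len + 1) 1).foldl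
            (fun d i => d.modify (PySem.List.slice token_ids (some i) (some (i + pattern_len))) 0 (· + 1))
            (PySem.Dict.empty : PySem.Dict (List Int) Int)).items.foldl
          (fun acc pc => if pc.2 ≥ 3 then acc ++ [(pc.1, pc.2)] else acc) patterns)
      (g := fun patterns pattern_len =>
        patterns ++
          PySem.List.sorted
            (pvRuns (PySem.List.sorted
              ((PySem.List.pyRange 0 ((token_ids.length : Int) - pattern_len + 1) 1).map
                (fun i => PySem.List.slice token_ids (some i) (some (i + pattern_len))))
              (fun w => w)))
            (fun t => (PySem.List.index?
              ((PySem.List.pyRange 0 ((token_ids.length : Int) - pattern_len + 1) 1).map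
                (fun i => PySem.List.slice token_ids (some i) (some (i + pattern_len)))) t.1).getD 0))
      (fun acc x _ => pv_inner_eq token_ids x acc)
    rw [hfold]

-- ===== VERDICT (by name: the statement is the Claim_ definition above) =====
theorem detect_pattern_repetition_spec : Claim_equal_detect_pattern_repetition := by
  intro token_ids max_pattern_length _
  unfold Spec_detect_pattern_repetition
  exact detect_pattern_repetition_eq_alt token_ids max_pattern_length
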